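-- pv_equiv track=rewrite | github.com/ydb-platform/ydb | contrib/python/holoviews/holoviews/core/traversal.py | bijective
-- ===== SOURCE A (Python) =====
-- from operator import itemgetter
--
-- def bijective(keys):
--     ndims = len(keys[0])
--     if ndims <= 1:
--         return True
--     for idx in range(ndims):
--         getter = itemgetter(*(i for i in range(ndims) if i != idx))
--         store = []
--         for key in keys:
--             subkey = getter(key)
--             if subkey in store:
--                 return False
--             store.append(subkey)
--     return True
-- ===== SOURCE B (Python) =====
-- def bijective(keys):
--     ndims = len(keys[0])
--     if ndims <= 1:
--         return True
--     for i, a in enumerate(keys):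
--         for b in keys[i + 1:]:
--             if sum(1 for d in range(ndims) if a[d] != b[d]) <= 1:
--                 return False
--     return True
-- ===== Notes on version B (the rewrite author's own statement) =====
-- stated objective: alternative
-- what changed: Replaces the per-dimension projection+dedup scan (build ndims projected key stores with linear membership tests) by a single pairwise pass that returns False when two keys differ in at most one coordinate (Hamming distance <= 1), which is equivalent to some projection colliding.
-- outside the precondition, e.g. on bijective([(1, 2), (1, 2), (3,)]): A returns False, B returns False
import Mathlib
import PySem

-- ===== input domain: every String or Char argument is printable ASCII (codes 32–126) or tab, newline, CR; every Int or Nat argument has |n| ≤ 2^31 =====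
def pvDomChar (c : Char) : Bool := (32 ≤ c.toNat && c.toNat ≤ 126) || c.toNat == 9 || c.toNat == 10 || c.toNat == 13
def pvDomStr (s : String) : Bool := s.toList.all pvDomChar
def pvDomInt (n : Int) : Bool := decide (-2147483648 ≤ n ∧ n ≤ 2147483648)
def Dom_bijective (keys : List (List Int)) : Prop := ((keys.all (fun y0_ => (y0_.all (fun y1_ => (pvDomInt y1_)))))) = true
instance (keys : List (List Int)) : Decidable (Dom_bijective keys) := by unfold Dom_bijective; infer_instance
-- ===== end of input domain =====

-- B replaces A's per-dimension projection+dedup scan by a pairwise check that no two keys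
-- differ in at most one coordinate (alternative decomposition, same exact result).


-- ===== PORT A =====
-- itemgetter(*(i for i in range(ndims) if i != idx)) applied to key; exact on Pre_
-- (Pre_ guarantees every indexed position exists, so getD's default is never used)
def projA (ndims idx : Nat) (key : List Int) : List Int :=
  ((List.range ndims).filter (fun i => i ≠ idx)).map (fun i => key.getD i 0)

-- the inner 'for key in keys' loop with its store and early return False
def innerA (ndims idx : Nat) (ks : List (List Int)) (store : List (List Int)) : Bool :=
  match ks with
  | [] => true
  | k :: rest =>
    let sub := projA ndims idx k
    if sub ∈ store then false else innerA ndims idx rest (store ++ [sub])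

-- the outer 'for idx in range(ndims)' loop
def outerA (ndims : Nat) (idxs : List Nat) (keys : List (List Int)) : Bool :=
  match idxs with
  | [] => true
  | idx :: rest => if innerA ndims idx keys [] = false then false else outerA ndims rest keys

def bijective (keys : List (List Int)) : Bool :=
  match keys with
  | [] => false  -- Python raises IndexError on keys[0]; excluded by Pre_
  | k0 :: _ =>
    let ndims := k0.length
    if ndims ≤ 1 then true
    else outerA ndims (List.range ndims) keys

-- ===== PORT B =====
-- sum(1 for d in range(ndims) if a[d] != b[d])
def hamB (ndims : Nat) (a b : List Int) : Nat :=
  (List.range ndims).countP (fun d => a.getD d 0 ≠ b.getD d 0)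

-- 'for i, a in enumerate(keys): for b in keys[i+1:]' with early return False
def pairsB (ndims : Nat) (ks : List (List Int)) : Bool :=
  match ks with
  | [] => true
  | a :: rest => rest.all (fun b => 1 < hamB ndims a b) && pairsB ndims rest

def bijective_alt (keys : List (List Int)) : Bool :=
  match keys with
  | [] => false  -- Python raises IndexError on keys[0]; excluded by Pre_
  | k0 :: _ =>
    let ndims := k0.length
    if ndims ≤ 1 then true
    else pairsB ndims keys

-- ===== PRECONDITION & SPEC =====
-- Pre_ excludes the inputs where Python A raises IndexError: the empty list (keys[0]) and,
-- when ndims ≥ 2, any key shorter than ndims (itemgetter indexing); on a few such ragged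
-- inputs A (and B) still returns False via an early duplicate found before the short key is
-- indexed — those accidental returns are excluded too (both programs agree there anyway).
def Pre_bijective (keys : List (List Int)) : Prop :=
  keys ≠ [] ∧
    ((keys.headD []).length ≤ 1 ∨ ∀ k ∈ keys, (keys.headD []).length ≤ k.length)
instance (keys : List (List Int)) : Decidable (Pre_bijective keys) := by
  unfold Pre_bijective; infer_instance

def pvWitness_bijective : List (List Int) := [[1, 2], [3, 4]]

def Spec_bijective (keys : List (List Int)) (out : Bool) : Prop := out = bijective_alt keys
instance (keys : List (List Int)) (out : Bool) : Decidable (Spec_bijective keys out) := by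
  unfold Spec_bijective; infer_instance

-- ===== CLAIM (what is proved, stated in full; the proofs are below) =====
def Claim_equal_bijective : Prop :=
  ∀ (keys : List (List Int)), Dom_bijective keys → Pre_bijective keys →
    Spec_bijective keys (bijective keys)

-- ===== LEMMAS AND PROOFS =====

theorem innerA_true_iff (ndims idx : Nat) (ks : List (List Int)) :
    ∀ store, innerA ndims idx ks store = true ↔
      ((ks.map (projA ndims idx)).Nodup ∧ ∀ x ∈ ks.map (projA ndims idx), x ∉ store) := by
  induction ks with
  | nil => simp [innerA]
  | cons k rest ih =>
    intro store
    simp only [innerA, List.map_cons, List.nodup_cons, List.mem_cons]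
    split
    · rename_i hmem
      simp only [Bool.false_eq_true, false_iff]
      intro ⟨_, h2⟩
      exact h2 _ (Or.inl rfl) hmem
    · rename_i hmem
      rw [ih]
      constructor
      · rintro ⟨hnd, hall⟩
        refine ⟨⟨fun hm => ?_, hnd⟩, ?_⟩
        · exact (hall _ hm) (by simp)
        · rintro x (rfl | hx) hxs
          · exact hmem hxs
          · exact hall x hx (by simp [hxs])
      · rintro ⟨⟨hne, hnd⟩, hall⟩
        refine ⟨hnd, fun x hx hxs => ?_⟩
        rcases List.mem_append.1 hxs with h | h
        · exact hall x (Or.inr hx) h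
        · simp at h; subst h; exact hne hx

theorem outerA_true_iff (ndims : Nat) (idxs : List Nat) (keys : List (List Int)) :
    outerA ndims idxs keys = true ↔ ∀ idx ∈ idxs, innerA ndims idx keys [] = true := by
  induction idxs with
  | nil => simp [outerA]
  | cons i rest ih =>
    simp only [outerA, List.mem_cons]
    split
    · rename_i h
      simp only [Bool.false_eq_true, false_iff]
      intro hall
      exact absurd (hall i (Or.inl rfl)) (by simp [h])
    · rename_i h
      rw [ih]
      constructor
      · rintro hall x (rfl | hx)
        · exact Bool.ne_false_iff.mp h
        · exact hall x hx
      · intro hall x hx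
        exact hall x (Or.inr hx)

theorem pairsB_true_iff (ndims : Nat) (ks : List (List Int)) :
    pairsB ndims ks = true ↔ ks.Pairwise (fun a b => 1 < hamB ndims a b) := by
  induction ks with
  | nil => simp [pairsB]
  | cons a rest ih =>
    simp [pairsB, ih, List.pairwise_cons, List.all_eq_true]

-- the core pairwise fact: some dropped-dimension projection collides on a,b
-- iff a,b differ in at most one of the first ndims coordinates
theorem proj_collide_iff (n : Nat) (hn : 2 ≤ n) (a b : List Int) :
    (∃ idx < n, projA n idx a = projA n idx b) ↔ hamB n a b ≤ 1 := by
  constructor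
  · rintro ⟨idx, hidx, heq⟩
    have hpt : ∀ i ∈ (List.range n).filter (fun i => i ≠ idx),
        a.getD i 0 = b.getD i 0 := by
      intro i hi
      have heq' : ((List.range n).filter (fun i => i ≠ idx)).map (fun i => a.getD i 0) =
          ((List.range n).filter (fun i => i ≠ idx)).map (fun i => b.getD i 0) := heq
      exact List.map_inj_left.mp heq' i hi
    have h1 : hamB n a b ≤ (List.range n).countP (fun d => d = idx) := by
      apply List.countP_mono_left
      intro d hd hp
      by_contra hne
      have hd' : d ∈ (List.range n).filter (fun i => i ≠ idx) := by
        simp only [List.mem_filter, decide_eq_true_eq]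
        exact ⟨hd, by simpa using hne⟩
      have hp' : a.getD d 0 ≠ b.getD d 0 := by simpa using hp
      exact hp' (hpt d hd')
    have h2 : (List.range n).countP (fun d => d = idx) ≤ 1 := by
      have hcc : (List.range n).countP (fun d => decide (d = idx)) = (List.range n).count idx :=
        List.countP_congr (by intro x _; simp)
      rw [hcc, List.count_range]
      split <;> omega
    omega
  · intro hle
    set diffs := (List.range n).filter (fun d => decide (a.getD d 0 ≠ b.getD d 0)) with hdiffs
    have hmem : ∀ i, i ∈ diffs ↔ i < n ∧ a.getD i 0 ≠ b.getD i 0 := by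
      intro i; simp [hdiffs]
    have hlen : diffs.length ≤ 1 := by
      rw [hdiffs, ← List.countP_eq_length_filter]
      exact hle
    have key : ∃ idx < n, ∀ i < n, i ≠ idx → a.getD i 0 = b.getD i 0 := by
      match hd : diffs with
      | [] =>
        refine ⟨0, by omega, fun i hi hne => ?_⟩
        by_contra hcon
        have hin := (hmem i).2 ⟨hi, hcon⟩
        simp at hin
      | [d0] =>
        have hd0 : d0 < n ∧ a.getD d0 0 ≠ b.getD d0 0 := (hmem d0).1 (by simp)
        refine ⟨d0, hd0.1, fun i hi hne => ?_⟩
        by_contra hcon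
        have hin := (hmem i).2 ⟨hi, hcon⟩
        simp at hin
        exact hne hin
      | d0 :: d1 :: rest => simp at hlen
    obtain ⟨idx, hidx, hall⟩ := key
    refine ⟨idx, hidx, ?_⟩
    show ((List.range n).filter (fun i => i ≠ idx)).map (fun i => a.getD i 0) =
        ((List.range n).filter (fun i => i ≠ idx)).map (fun i => b.getD i 0)
    apply List.map_inj_left.mpr
    intro i hi
    simp only [List.mem_filter, List.mem_range, decide_eq_true_eq] at hi
    exact hall i hi.1 hi.2

theorem pairwise_swap {α : Type} (l : List α) (R : Nat → α → α → Prop) (n : Nat) :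
    (∀ idx < n, l.Pairwise (R idx)) ↔ l.Pairwise (fun a b => ∀ idx < n, R idx a b) := by
  simp only [List.pairwise_iff_getElem]
  constructor
  · intro h i j hi hj hij idx hidx
    exact h idx hidx i j hi hj hij
  · intro h idx hidx i j hi hj hij
    exact h i j hi hj hij idx hidx

theorem core_eq (n : Nat) (hn : 2 ≤ n) (keys : List (List Int)) :
    outerA n (List.range n) keys = pairsB n keys := by
  rw [Bool.eq_iff_iff, outerA_true_iff, pairsB_true_iff]
  have h1 : (∀ idx ∈ List.range n, innerA n idx keys [] = true) ↔
      (∀ idx < n, keys.Pairwise (fun a b => projA n idx a ≠ projA n idx b)) := by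
    constructor
    · intro h idx hidx
      have := (innerA_true_iff n idx keys []).1 (h idx (List.mem_range.2 hidx))
      exact List.pairwise_map.mp this.1
    · intro h idx hidx
      rw [innerA_true_iff]
      refine ⟨?_, by simp⟩
      exact List.pairwise_map.mpr (h idx (List.mem_range.1 hidx))
  rw [h1, pairwise_swap]
  apply List.Pairwise.iff
  intro a b
  constructor
  · intro h
    by_contra hle
    obtain ⟨idx, hidx, heq⟩ := (proj_collide_iff n hn a b).2 (by omega)
    exact h idx hidx heq
  · intro h idx hidx heq
    have := (proj_collide_iff n hn a b).1 ⟨idx, hidx, heq⟩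
    omega

-- ===== VERDICT (by name: the statement is the Claim_ definition above) =====
theorem bijective_spec : Claim_equal_bijective := by
  intro keys _ hpre
  unfold Spec_bijective
  obtain ⟨hne, -⟩ := hpre
  match keys with
  | [] => exact absurd rfl hne
  | k0 :: rest =>
    simp only [bijective, bijective_alt]
    split
    · rfl
    · rename_i h
      exact core_eq k0.length (by omega) (k0 :: rest)
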